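-- pv_equiv track=rewrite | github.com/sroccaserra/aoc2015 | src/03.py | visits
-- ===== SOURCE A (Python) =====
-- D = {"^": (0, 1), ">": (1, 0), "v": (0, -1), "<": (-1, 0)}
--
-- def visits(commands):
--     (x, y) = (0, 0)
--     visited = {(x, y): 1}
--     for c in commands:
--         (dx, dy) = D[c]
--         (x, y) = (x + dx, y + dy)
--         if (x, y) in visited:
--             visited[(x, y)] += 1
--         else:
--             visited[(x, y)] = 1
--     return visited
-- ===== SOURCE B (Python) =====
-- D = {"^": (0, 1), ">": (1, 0), "v": (0, -1), "<": (-1, 0)}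
--
-- def visits(commands):
--     # pass 1: the trajectory as a list, each cell derived from the list's last entry
--     path = [(0, 0)]
--     for c in commands:
--         dx, dy = D[c]
--         x, y = path[-1]
--         path.append((x + dx, y + dy))
--     # pass 2: no incremental tally — one occurrence scan per distinct cell,
--     # keys in first-visit order via dict.fromkeys
--     return {p: path.count(p) for p in dict.fromkeys(path)}
-- ===== Notes on version B (the rewrite author's own statement) =====
-- stated objective: alternative
-- what changed: B replaces A's fused walk with an incremental counting dict by two passes: materialize the trajectory list (each cell from the list's last entry), then build the result with a dict comprehension over dict.fromkeys(path) that counts each distinct cell by a path.count occurrence scan - no incremental tally anywhere.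
import Mathlib
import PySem

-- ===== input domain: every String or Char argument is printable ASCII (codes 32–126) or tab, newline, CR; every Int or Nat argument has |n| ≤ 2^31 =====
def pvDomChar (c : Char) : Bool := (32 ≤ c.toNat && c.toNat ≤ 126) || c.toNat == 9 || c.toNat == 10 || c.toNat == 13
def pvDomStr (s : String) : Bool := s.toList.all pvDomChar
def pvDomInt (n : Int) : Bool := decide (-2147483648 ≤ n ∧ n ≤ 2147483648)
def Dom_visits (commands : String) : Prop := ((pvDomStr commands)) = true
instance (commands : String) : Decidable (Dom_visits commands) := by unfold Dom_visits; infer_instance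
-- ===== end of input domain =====

-- One honest line: instead of A's fused walk with an incremental counting dict, B first
-- materializes the trajectory list and then counts each distinct cell by an occurrence
-- scan (path.count), keys in first-visit order (objective: alternative).

-- ===== PORT A =====
-- the module-level dict D = {"^": (0, 1), ">": (1, 0), "v": (0, -1), "<": (-1, 0)}
def pvD : PySem.Dict Char (Int × Int) :=
  PySem.Dict.ofList [('^', (0, 1)), ('>', (1, 0)), ('v', (0, -1)), ('<', (-1, 0))]

-- D[c]; Python raises KeyError when c is not a key of D — Pre_visits excludes that, default never read there
def pvDelta (c : Char) : Int × Int := (pvD.get? c).getD (0, 0)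

-- the for-loop of A: state ((x, y), visited)
def visitsLoop (st : (Int × Int) × PySem.Dict (Int × Int) Int) (cs : List Char) :
    (Int × Int) × PySem.Dict (Int × Int) Int :=
  match cs with
  | [] => st
  | c :: rest =>
      let (dx, dy) := pvDelta c
      let p := (st.1.1 + dx, st.1.2 + dy)
      let d := if st.2.contains p then st.2.insert p (st.2.getD p 0 + 1)
               else st.2.insert p 1
      visitsLoop (p, d) rest

def visits (commands : String) : List (Int × Int × Int) :=
  ((visitsLoop ((0, 0), PySem.Dict.empty.insert (0, 0) 1) commands.toList).2).items.map
    (fun q => (q.1.1, q.1.2, q.2))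

-- ===== PORT B =====
-- pass 1 of Source B: path.append((path[-1][0] + dx, path[-1][1] + dy))
def pvBStep (path : List (Int × Int)) (c : Char) : List (Int × Int) :=
  let (dx, dy) := pvDelta c
  let (x, y) := (PySem.List.pyGet? path (-1)).getD (0, 0)   -- path[-1]; path is never []
  path ++ [(x + dx, y + dy)]

def visits_alt (commands : String) : List (Int × Int × Int) :=
  let path := commands.toList.foldl pvBStep [(0, 0)]
  -- pass 2 of Source B: {p: path.count(p) for p in dict.fromkeys(path)}
  (PySem.Dict.ofList ((PySem.List.dedup path).map
      (fun p => (p, (path.count p : Int))))).items.map (fun q => (q.1.1, q.1.2, q.2))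

-- ===== PRECONDITION & SPEC =====
-- Pre_ excludes exactly the commands containing a character that is not one of the four direction keys of D, on which A's D[c] raises KeyError
def Pre_visits (commands : String) : Prop :=
  (commands.toList.all (fun c => c == '^' || c == '>' || c == 'v' || c == '<')) = true
instance (commands : String) : Decidable (Pre_visits commands) := by unfold Pre_visits; infer_instance

def pvWitness_visits : String := "^>v<>"

def Spec_visits (commands : String) (out : List (Int × Int × Int)) : Prop := out = visits_alt commands
instance (commands : String) (out : List (Int × Int × Int)) : Decidable (Spec_visits commands out) := by unfold Spec_visits; infer_instance

-- ===== CLAIM (what is proved, stated in full; the proofs are below) =====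
def Claim_equal_visits : Prop := ∀ (commands : String), Dom_visits commands → Pre_visits commands → Spec_visits commands (visits commands)

-- ===== LEMMAS AND PROOFS =====

-- the positions A's walk passes through after p (proof-only helper)
def pathAux (p : Int × Int) (cs : List Char) : List (Int × Int) :=
  match cs with
  | [] => []
  | c :: rest =>
      let q := (p.1 + (pvDelta c).1, p.2 + (pvDelta c).2)
      q :: pathAux q rest

-- both branches of A's update are the same insert
lemma aStep_eq (d : PySem.Dict (Int × Int) Int) (p : Int × Int) :
    (if d.contains p then d.insert p (d.getD p 0 + 1) else d.insert p 1)
      = d.insert p (d.getD p 0 + 1) := by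
  by_cases h : d.contains p = true
  · simp [h]
  · simp only [Bool.not_eq_true] at h
    rw [PySem.Dict.getD_of_not_contains (d := d) (k := p) (d0 := 0) h]
    simp [h]

-- A's fused loop tallies exactly the positions of pathAux
lemma visitsLoop_eq_foldl (cs : List Char) (p : Int × Int) (d : PySem.Dict (Int × Int) Int) :
    (visitsLoop (p, d) cs).2
      = (pathAux p cs).foldl (fun d q => d.insert q (d.getD q 0 + 1)) d := by
  induction cs generalizing p d with
  | nil => rfl
  | cons c rest ih =>
      simp only [visitsLoop, pathAux, List.foldl_cons]
      rw [aStep_eq]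
      exact ih _ _

-- B's append loop builds exactly (the prefix ++) pathAux
lemma bLoop_eq_pathAux (cs : List Char) (acc : List (Int × Int)) (p : Int × Int) :
    cs.foldl pvBStep (acc ++ [p]) = acc ++ p :: pathAux p cs := by
  induction cs generalizing acc p with
  | nil => simp [pathAux]
  | cons c rest ih =>
      simp only [List.foldl_cons, pathAux]
      have hlast : (PySem.List.pyGet? (acc ++ [p]) (-1)).getD (0, 0) = p := by
        simp [PySem.List.pyGet?, PySem.List.pyIdx?]
      have hstep : pvBStep (acc ++ [p]) c
          = (acc ++ [p]) ++ [(p.1 + (pvDelta c).1, p.2 + (pvDelta c).2)] := by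
        simp only [pvBStep, hlast]
      rw [hstep, ih (acc ++ [p]) _]
      simp

-- the dict comprehension's items, for nodup keys
lemma items_ofList_nodup (l : List ((Int × Int) × Int)) (h : (l.map Prod.fst).Nodup) :
    (PySem.Dict.ofList l).items = l := by
  unfold PySem.Dict.ofList PySem.Dict.update
  rw [PySem.Dict.items_foldl_insert_fresh (k := Prod.fst) (v := Prod.snd)]
  · simp [PySem.Dict.empty]
  · intro a _; simp [PySem.Dict.contains_empty]
  · exact h

-- ===== VERDICT (by name: the statement is the Claim_ definition above) =====
theorem visits_spec : Claim_equal_visits := by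
  intro commands _ _
  show _ = _
  simp only [visits, visits_alt]
  rw [visitsLoop_eq_foldl]
  rw [show ([((0 : Int), (0 : Int))]) = ([] : List (Int × Int)) ++ [(0, 0)] from rfl,
      bLoop_eq_pathAux]
  rw [items_ofList_nodup]
  · -- A's tally from {origin: 1} is the counter of the whole path
    have h0 : (PySem.Dict.empty.insert ((0 : Int), (0 : Int)) 1 : PySem.Dict (Int × Int) Int)
        = PySem.Dict.empty.insert (0, 0) (PySem.Dict.empty.getD ((0 : Int), (0 : Int)) 0 + 1) := by
      rw [PySem.Dict.getD_empty]; norm_num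
    rw [h0, show ((PySem.Dict.empty.insert ((0 : Int), (0 : Int))
          (PySem.Dict.empty.getD ((0 : Int), (0 : Int)) 0 + 1)) : PySem.Dict (Int × Int) Int)
        = [((0 : Int), (0 : Int))].foldl
            (fun d q => d.insert q (d.getD q 0 + 1)) PySem.Dict.empty from rfl,
      ← List.foldl_append, ← List.singleton_append,
      PySem.Dict.foldl_insert_getD_add_one_eq_counter, PySem.Dict.items_counter]
    simp [PySem.List.dedup_eq_ofList]
  · -- dedup keys are nodup
    simp only [List.map_map, List.nil_append]
    rw [show (Prod.fst ∘ fun p : Int × Int =>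
        (p, (List.count p ((0, 0) :: pathAux (0, 0) commands.toList) : Int))) = id from rfl,
      List.map_id]
    exact PySem.Set.nodup_ofList _
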